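-- pv_equiv track=rewrite | github.com/GrandDuelist/mongo_cs336 | python/KaggleWord2VecUtility.py | convert_clxia
-- ===== SOURCE A (Python) =====
-- def convert_clxia(words_in_list):
--     words_in_dict = {}
--     count = 0
--
--     for word in words_in_list:
--         word = word.lower() # make all letter to lowercase
--         r = words_in_dict.get(word, [])
--         r.append(count)
--         words_in_dict[word] = r
--         count += 1
--     #
--     return words_in_dict
-- ===== SOURCE B (Python) =====
-- def convert_clxia(words_in_list):
--     lows = [w.lower() for w in words_in_list]
--     return {w: [i for i, x in enumerate(lows) if x == w]
--             for w in dict.fromkeys(lows)}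
-- ===== Notes on version B (the rewrite author's own statement) =====
-- stated objective: simpler
-- what changed: Instead of A's single pass mutating a dict of growing index lists with a manual counter, B deduplicates the lowercased words once and builds each key's index list by a direct comprehension over enumerate.
import Mathlib
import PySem

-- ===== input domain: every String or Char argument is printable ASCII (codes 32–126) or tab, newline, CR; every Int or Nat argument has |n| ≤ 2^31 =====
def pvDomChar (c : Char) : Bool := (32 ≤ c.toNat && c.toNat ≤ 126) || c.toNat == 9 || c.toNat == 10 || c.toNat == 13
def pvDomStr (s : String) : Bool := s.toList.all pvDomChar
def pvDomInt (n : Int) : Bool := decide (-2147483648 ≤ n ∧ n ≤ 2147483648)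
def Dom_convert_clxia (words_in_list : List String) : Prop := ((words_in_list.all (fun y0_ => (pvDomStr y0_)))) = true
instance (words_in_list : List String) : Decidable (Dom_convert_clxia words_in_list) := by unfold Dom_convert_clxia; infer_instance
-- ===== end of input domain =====

-- B replaces A's single-pass dict mutation with dedup-then-collect per key (objective: simpler).


-- ===== PORT A =====
def convert_clxia (words_in_list : List String) : List (String × List Int) :=
  (words_in_list.foldl
    (fun (st : PySem.Dict String (List Int) × Int) word =>
      let w := PySem.Str.lower word
      let r := st.1.getD w []
      (st.1.insert w (r ++ [st.2]), st.2 + 1))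
    (PySem.Dict.empty, 0)).1.items

-- ===== PORT B =====
-- dict comprehension over distinct keys: built directly as the assoc list (keys from dedup are distinct)
def convert_clxia_alt (words_in_list : List String) : List (String × List Int) :=
  let lows := words_in_list.map PySem.Str.lower
  (PySem.List.dedup lows).map (fun w =>
    (w, ((PySem.List.enumerate lows 0).filter (fun p => p.2 == w)).map (fun p => p.1)))

-- ===== PRECONDITION & SPEC =====
def Spec_convert_clxia (words_in_list : List String) (out : List (String × List Int)) : Prop := out = convert_clxia_alt words_in_list
instance (words_in_list : List String) (out : List (String × List Int)) : Decidable (Spec_convert_clxia words_in_list out) := by unfold Spec_convert_clxia; infer_instance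

-- ===== CLAIM (what is proved, stated in full; the proofs are below) =====
def Claim_equal_convert_clxia : Prop := ∀ (words_in_list : List String), Dom_convert_clxia words_in_list → Spec_convert_clxia words_in_list (convert_clxia words_in_list)

-- ===== LEMMAS AND PROOFS =====

-- A's loop, with accumulator (d, c) and the counter aligned with enumerate's start,
-- is the modify-append fold over the (word, index) pairs of the lowercased list.
lemma foldA_eq_modify (ws : List String) (d : PySem.Dict String (List Int)) (c : Int) :
    (ws.foldl
      (fun (st : PySem.Dict String (List Int) × Int) word =>
        let w := PySem.Str.lower word
        let r := st.1.getD w []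
        (st.1.insert w (r ++ [st.2]), st.2 + 1)) (d, c)).1
    = ((PySem.List.enumerate (ws.map PySem.Str.lower) c).map (fun p => (p.2, p.1))).foldl
        (fun d p => d.modify p.1 [] (· ++ [p.2])) d := by
  induction ws generalizing d c with
  | nil => simp [PySem.List.enumerate_nil]
  | cons x xs ih =>
      simp only [List.foldl_cons, List.map_cons, PySem.List.enumerate_cons, List.map]
      rw [ih]
      congr 1

-- ===== VERDICT (by name: the statement is the Claim_ definition above) =====
theorem convert_clxia_spec : Claim_equal_convert_clxia := by
  intro ws _
  unfold Spec_convert_clxia convert_clxia convert_clxia_alt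
  rw [foldA_eq_modify]
  set lows := ws.map PySem.Str.lower with hlows
  set L := (PySem.List.enumerate lows 0).map (fun p => (p.2, p.1)) with hL
  have hnd : (L.foldl (fun d p => d.modify p.1 [] (· ++ [p.2])) PySem.Dict.empty).keys.Nodup := by
    exact PySem.Dict.nodup_keys_foldl_modify_key L (fun p => p.1) [] (fun _ p => (· ++ [p.2])) _
      PySem.Dict.nodup_keys_empty
  rw [PySem.Dict.items_eq_map_keys _ hnd []]
  have hkeys : (L.foldl (fun d p => d.modify p.1 [] (· ++ [p.2])) PySem.Dict.empty).keys
      = PySem.List.dedup lows := by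
    rw [PySem.Dict.keys_foldl_modify_key]
    simp [hL, List.map_map, Function.comp_def, PySem.List.map_snd_enumerate,
      PySem.Set.update_nil_left, PySem.List.dedup_eq_ofList]
  rw [hkeys]
  apply List.map_congr_left
  intro w _
  have hget := PySem.Dict.getD_foldl_modify_append (l := L) (d := PySem.Dict.empty) (c := w)
  rw [hget]
  simp [hL, List.filter_map, List.map_map, Function.comp_def]
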